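-- pv_equiv track=rewrite | github.com/kungminno/programmers | algorithm/algorithm_62.py | solution
-- ===== SOURCE A (Python) =====
-- def solution(babbling):
--     answer = 0
--     says = ["aya", "ye", "woo", "ma"]
--
--     for word in babbling:
--         used = [True, True, True, True]
--         match, final = "", ""
--         for w in word:
--             match += w
--             if match in says and used[says.index(match)]:
--                 final += match
--                 used = [True, True, True, True]
--                 used[says.index(match)] = False
--                 match = ""
--
--         if word == final:
--             answer += 1
--
--     return answer
-- ===== SOURCE B (Python) =====
-- def solution(babbling):
--     says = ["aya", "ye", "woo", "ma"]
--     answer = 0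
--     for word in babbling:
--         rest = word
--         last = None
--         while rest:
--             for s in says:
--                 if s != last and rest.startswith(s):
--                     rest = rest[len(s):]
--                     last = s
--                     break
--             else:
--                 break
--         if not rest:
--             answer += 1
--     return answer
-- ===== Notes on version B (the rewrite author's own statement) =====
-- stated objective: simpler
-- what changed: B strips known sounds off the front of the word (rest/last greedy loop with startswith) instead of accumulating characters one by one with membership tests and says.index lookups over the word; the no-consecutive-repeat rule is carried by a single `last` variable instead of a rebuilt `used` list.
import Mathlib
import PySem

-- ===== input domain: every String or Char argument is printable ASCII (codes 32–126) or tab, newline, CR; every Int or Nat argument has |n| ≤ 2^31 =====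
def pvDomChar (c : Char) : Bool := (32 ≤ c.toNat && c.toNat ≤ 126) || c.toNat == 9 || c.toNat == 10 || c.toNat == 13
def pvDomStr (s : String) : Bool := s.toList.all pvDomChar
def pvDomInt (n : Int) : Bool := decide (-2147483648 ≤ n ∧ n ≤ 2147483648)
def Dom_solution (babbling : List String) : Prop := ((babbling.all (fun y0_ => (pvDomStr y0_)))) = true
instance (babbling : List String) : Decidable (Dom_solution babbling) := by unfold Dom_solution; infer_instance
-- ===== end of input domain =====

-- B strips matching sounds from the front of the word (greedy prefix stripping with a `last` ban)
-- instead of accumulating characters with membership/index lookups; a simpler decomposition, same value.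

-- ===== PORT A =====
-- says = ["aya", "ye", "woo", "ma"], as lists of chars (strings handled via toList)
def saysL : List (List Char) := [['a','y','a'], ['y','e'], ['w','o','o'], ['m','a']]

-- one iteration of A's inner `for w in word` loop; state = (match, used, final)
def stepA (st : List Char × List Bool × List Char) (w : Char) : List Char × List Bool × List Char :=
  let m := st.1 ++ [w]
  if m ∈ saysL then
    match PySem.List.index? saysL m with
    | some i =>
      if st.2.1.getD i false then
        ([], ((List.replicate 4 true).set i false : List Bool), st.2.2 ++ m)
      else (m, st.2.1, st.2.2)
    | none => (m, st.2.1, st.2.2)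
  else (m, st.2.1, st.2.2)

def solution (babbling : List String) : Int :=
  babbling.foldl (fun answer word =>
    let st := word.toList.foldl stepA ([], [true, true, true, true], [])
    if word.toList = st.2.2 then answer + 1 else answer) 0

-- ===== PORT B =====
-- B's `while rest:` loop: try the sounds in order, strip the first that is ≠ last and a prefix
def greedy : List Char → Option (List Char) → Bool
  | [], _ => true
  | c :: cs, last =>
    match hf : saysL.find? (fun s => decide (some s ≠ last) && s.isPrefixOf (c :: cs)) with
    | some s => greedy ((c :: cs).drop s.length) (some s)
    | none => false
termination_by rest _ => rest.length
decreasing_by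
  have hm := List.mem_of_find?_eq_some hf
  have hs : 0 < s.length := by
    simp only [saysL, List.mem_cons, List.not_mem_nil, or_false] at hm
    rcases hm with h | h | h | h <;> subst h <;> decide
  simp only [List.length_drop, List.length_cons]
  omega

def solution_alt (babbling : List String) : Int :=
  babbling.foldl (fun answer word =>
    if greedy word.toList none then answer + 1 else answer) 0

-- ===== PRECONDITION & SPEC =====
def Spec_solution (babbling : List String) (out : Int) : Prop := out = solution_alt babbling
instance (babbling : List String) (out : Int) : Decidable (Spec_solution babbling out) := by unfold Spec_solution; infer_instance

-- ===== CLAIM (what is proved, stated in full; the proofs are below) =====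
def Claim_equal_solution : Prop := ∀ (babbling : List String), Dom_solution babbling → Spec_solution babbling (solution babbling)

-- ===== LEMMAS AND PROOFS =====

-- the `used` lists reachable in A, indexed by the last matched sound
def mkUsed : Option (List Char) → List Bool
  | none => [true, true, true, true]
  | some s =>
    if s = ['a','y','a'] then [false, true, true, true]
    else if s = ['y','e'] then [true, false, true, true]
    else if s = ['w','o','o'] then [true, true, false, true]
    else [true, true, true, false]

def lastOpts : List (Option (List Char)) :=
  [none, some ['a','y','a'], some ['y','e'], some ['w','o','o'], some ['m','a']]

lemma idx_aya : List.idxOf? ['a','y','a'] [['a','y','a'],['y','e'],['w','o','o'],['m','a']] = some 0 := by decide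
lemma idx_ye : List.idxOf? ['y','e'] [['a','y','a'],['y','e'],['w','o','o'],['m','a']] = some 1 := by decide
lemma idx_woo : List.idxOf? ['w','o','o'] [['a','y','a'],['y','e'],['w','o','o'],['m','a']] = some 2 := by decide
lemma idx_ma : List.idxOf? ['m','a'] [['a','y','a'],['y','e'],['w','o','o'],['m','a']] = some 3 := by decide

-- once `match` is nonempty and no sound extends it, A's inner loop only grows `match`
lemma foldA_frozen (cs : List Char) (m : List Char) (u : List Bool) (f : List Char)
    (hm : m ≠ []) (hnp : ∀ s ∈ saysL, ¬ m <+: s) :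
    cs.foldl stepA (m, u, f) = (m ++ cs, u, f) := by
  induction cs generalizing m with
  | nil => simp
  | cons c cs ih =>
    have hnotmem : m ++ [c] ∉ saysL := fun h => hnp _ h (List.prefix_append m [c])
    have hstep : stepA (m, u, f) c = (m ++ [c], u, f) := by
      simp [stepA, hnotmem]
    rw [List.foldl_cons, hstep, ih (m ++ [c]) (by simp)
      (fun s hs hp => hnp s hs ((List.prefix_append m [c]).trans hp))]
    simp

-- one unfolding of B's loop: no usable sound starts the rest / the sound s does
lemma greedy_none (c : Char) (cs : List Char) (last : Option (List Char))
    (hfind : saysL.find? (fun s => decide (some s ≠ last) && s.isPrefixOf (c::cs)) = none) :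
    greedy (c::cs) last = false := by
  rw [greedy]
  split
  · rename_i s heq; rw [hfind] at heq; exact absurd heq (by simp)
  · rfl

lemma greedy_some (c : Char) (cs : List Char) (last : Option (List Char)) (s : List Char)
    (hfind : saysL.find? (fun t => decide (some t ≠ last) && t.isPrefixOf (c::cs)) = some s) :
    greedy (c::cs) last = greedy ((c::cs).drop s.length) (some s) := by
  rw [greedy]
  split
  · rename_i t heq; rw [hfind] at heq; injection heq with heq; subst heq; rfl
  · rename_i heq; rw [hfind] at heq; exact absurd heq (by simp)

-- A's loop across one usable sound = a reset with that sound recorded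
lemma fold_match_aya (u : List Bool) (f cs : List Char) (hu : u[0]?.getD false = true) :
    ('a'::'y'::'a'::cs).foldl stepA ([], u, f)
      = cs.foldl stepA ([], mkUsed (some ['a','y','a']), f ++ ['a','y','a']) := by
  simp [stepA, saysL, idx_aya, hu, mkUsed]

lemma fold_match_ye (u : List Bool) (f cs : List Char) (hu : u[1]?.getD false = true) :
    ('y'::'e'::cs).foldl stepA ([], u, f)
      = cs.foldl stepA ([], mkUsed (some ['y','e']), f ++ ['y','e']) := by
  simp [stepA, saysL, idx_ye, hu, mkUsed]

lemma fold_match_woo (u : List Bool) (f cs : List Char) (hu : u[2]?.getD false = true) :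
    ('w'::'o'::'o'::cs).foldl stepA ([], u, f)
      = cs.foldl stepA ([], mkUsed (some ['w','o','o']), f ++ ['w','o','o']) := by
  simp [stepA, saysL, idx_woo, hu, mkUsed]

lemma fold_match_ma (u : List Bool) (f cs : List Char) (hu : u[3]?.getD false = true) :
    ('m'::'a'::cs).foldl stepA ([], u, f)
      = cs.foldl stepA ([], mkUsed (some ['m','a']), f ++ ['m','a']) := by
  simp [stepA, saysL, idx_ma, hu, mkUsed]

-- A's loop across a banned sound freezes `final`
lemma fold_banned_aya (u : List Bool) (f cs : List Char) (hu : u[0]?.getD false = false) :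
    (('a'::'y'::'a'::cs).foldl stepA ([], u, f)).2.2 = f := by
  rcases cs with _ | ⟨c4, cs4⟩
  · simp [stepA, saysL, idx_aya, hu]
  · have h1 : ['a','y','a'].foldl stepA ([], u, f) = (['a','y','a'], u, f) := by
      simp [stepA, saysL, idx_aya, hu]
    have h4 : stepA (['a','y','a'], u, f) c4 = (['a','y','a',c4], u, f) := by
      simp [stepA, saysL]
    have hsplit : ('a'::'y'::'a'::c4::cs4) = ['a','y','a'] ++ c4 :: cs4 := rfl
    rw [hsplit, List.foldl_append, h1, List.foldl_cons, h4,
        foldA_frozen cs4 ['a','y','a',c4] u f (by simp)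
          (by simp [saysL, List.cons_prefix_cons])]

lemma fold_banned_ye (u : List Bool) (f cs : List Char) (hu : u[1]?.getD false = false) :
    (('y'::'e'::cs).foldl stepA ([], u, f)).2.2 = f := by
  rcases cs with _ | ⟨c3, cs3⟩
  · simp [stepA, saysL, idx_ye, hu]
  · have h1 : ['y','e'].foldl stepA ([], u, f) = (['y','e'], u, f) := by
      simp [stepA, saysL, idx_ye, hu]
    have h3 : stepA (['y','e'], u, f) c3 = (['y','e',c3], u, f) := by
      simp [stepA, saysL]
    have hsplit : ('y'::'e'::c3::cs3) = ['y','e'] ++ c3 :: cs3 := rfl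
    rw [hsplit, List.foldl_append, h1, List.foldl_cons, h3,
        foldA_frozen cs3 ['y','e',c3] u f (by simp)
          (by simp [saysL, List.cons_prefix_cons])]

lemma fold_banned_woo (u : List Bool) (f cs : List Char) (hu : u[2]?.getD false = false) :
    (('w'::'o'::'o'::cs).foldl stepA ([], u, f)).2.2 = f := by
  rcases cs with _ | ⟨c4, cs4⟩
  · simp [stepA, saysL, idx_woo, hu]
  · have h1 : ['w','o','o'].foldl stepA ([], u, f) = (['w','o','o'], u, f) := by
      simp [stepA, saysL, idx_woo, hu]
    have h4 : stepA (['w','o','o'], u, f) c4 = (['w','o','o',c4], u, f) := by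
      simp [stepA, saysL]
    have hsplit : ('w'::'o'::'o'::c4::cs4) = ['w','o','o'] ++ c4 :: cs4 := rfl
    rw [hsplit, List.foldl_append, h1, List.foldl_cons, h4,
        foldA_frozen cs4 ['w','o','o',c4] u f (by simp)
          (by simp [saysL, List.cons_prefix_cons])]

lemma fold_banned_ma (u : List Bool) (f cs : List Char) (hu : u[3]?.getD false = false) :
    (('m'::'a'::cs).foldl stepA ([], u, f)).2.2 = f := by
  rcases cs with _ | ⟨c3, cs3⟩
  · simp [stepA, saysL, idx_ma, hu]
  · have h1 : ['m','a'].foldl stepA ([], u, f) = (['m','a'], u, f) := by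
      simp [stepA, saysL, idx_ma, hu]
    have h3 : stepA (['m','a'], u, f) c3 = (['m','a',c3], u, f) := by
      simp [stepA, saysL]
    have hsplit : ('m'::'a'::c3::cs3) = ['m','a'] ++ c3 :: cs3 := rfl
    rw [hsplit, List.foldl_append, h1, List.foldl_cons, h3,
        foldA_frozen cs3 ['m','a',c3] u f (by simp)
          (by simp [saysL, List.cons_prefix_cons])]

-- the central correspondence: from a reset state after sound `last`,
-- A's loop copies exactly the remaining characters into `final` iff B's greedy parse succeeds
lemma main_lemma : ∀ n (cs : List Char) (f : List Char) (last : Option (List Char)),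
    cs.length ≤ n → last ∈ lastOpts →
    ((cs.foldl stepA ([], mkUsed last, f)).2.2 = f ++ cs ↔ greedy cs last = true) := by
  intro n
  induction n with
  | zero =>
    intro cs f last hlen _
    have hnil : cs = [] := List.length_eq_zero_iff.mp (Nat.le_zero.mp hlen)
    subst hnil
    simpa using (by rw [greedy] : greedy [] last = true)
  | succ n ih =>
    intro cs f last hlen hl
    simp only [lastOpts, List.mem_cons, List.not_mem_nil, or_false] at hl
    rcases cs with _ | ⟨c, cs'⟩
    · simpa using (by rw [greedy] : greedy ([] : List Char) last = true)
    by_cases hca : c = 'a'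
    · subst hca
      rcases cs' with _ | ⟨c2, cs''⟩
      · have hstep : stepA ([], mkUsed last, f) 'a' = (['a'], mkUsed last, f) := by
          simp [stepA, saysL]
        rw [List.foldl_cons, hstep, List.foldl_nil]
        have hg : greedy ['a'] last = false := greedy_none _ _ _ (by
          simp [List.find?_eq_none, saysL, List.isPrefixOf])
        simp [hg]
      · by_cases h2 : c2 = 'y'
        · subst h2
          rcases cs'' with _ | ⟨c3, cs3⟩
          · have hst : stepA ([], mkUsed last, f) 'a' = (['a'], mkUsed last, f) := by
              simp [stepA, saysL]
            have h2s : stepA (['a'], mkUsed last, f) 'y' = (['a','y'], mkUsed last, f) := by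
              simp [stepA, saysL]
            rw [List.foldl_cons, hst, List.foldl_cons, h2s, List.foldl_nil]
            have hg : greedy ['a','y'] last = false := greedy_none _ _ _ (by
              simp [List.find?_eq_none, saysL, List.isPrefixOf])
            simp [hg]
          · by_cases h3 : c3 = 'a'
            · subst h3
              by_cases hb : last = some ['a','y','a']
              · subst hb
                rw [fold_banned_aya (mkUsed (some ['a','y','a'])) f cs3 (by decide)]
                have hg : greedy ('a'::'y'::'a'::cs3) (some ['a','y','a']) = false := greedy_none _ _ _ (by
                  simp [List.find?_eq_none, saysL, List.isPrefixOf])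
                simp [hg]
              · have hu : (mkUsed last)[0]?.getD false = true := by
                  rcases hl with rfl | rfl | rfl | rfl | rfl <;>
                    first | exact absurd rfl hb | decide
                rw [fold_match_aya (mkUsed last) f cs3 hu]
                have hlen' : cs3.length ≤ n := by simp at hlen; omega
                have hih := ih cs3 (f ++ ['a','y','a']) (some ['a','y','a']) hlen' (by simp [lastOpts])
                have hg : greedy ('a'::'y'::'a'::cs3) last = greedy cs3 (some ['a','y','a']) := by
                  have hfind : saysL.find? (fun t => decide (some t ≠ last) && t.isPrefixOf ('a'::'y'::'a'::cs3)) = some ['a','y','a'] := by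
                    simp [saysL, List.isPrefixOf, Ne.symm hb]
                  simpa using greedy_some _ _ _ _ hfind
                rw [hg, show f ++ ('a'::'y'::'a'::cs3) = (f ++ ['a','y','a']) ++ cs3 by simp]
                exact hih
            · have hst : stepA ([], mkUsed last, f) 'a' = (['a'], mkUsed last, f) := by
                simp [stepA, saysL]
              have h2s : stepA (['a'], mkUsed last, f) 'y' = (['a','y'], mkUsed last, f) := by
                simp [stepA, saysL]
              have h3s : stepA (['a','y'], mkUsed last, f) c3 = (['a','y',c3], mkUsed last, f) := by
                simp [stepA, saysL, h3]
              rw [List.foldl_cons, hst, List.foldl_cons, h2s, List.foldl_cons, h3s,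
                  foldA_frozen cs3 ['a','y',c3] (mkUsed last) f (by simp)
                    (by simp [saysL, List.cons_prefix_cons, h3])]
              have hg : greedy ('a'::'y'::c3::cs3) last = false := greedy_none _ _ _ (by
                simp [List.find?_eq_none, saysL, List.isPrefixOf, h3, Ne.symm h3])
              simp [hg]
        · have hst : stepA ([], mkUsed last, f) 'a' = (['a'], mkUsed last, f) := by
            simp [stepA, saysL]
          have h2s : stepA (['a'], mkUsed last, f) c2 = (['a',c2], mkUsed last, f) := by
            simp [stepA, saysL, h2]
          rw [List.foldl_cons, hst, List.foldl_cons, h2s,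
              foldA_frozen cs'' ['a',c2] (mkUsed last) f (by simp)
                (by simp [saysL, List.cons_prefix_cons, h2])]
          have hg : greedy ('a'::c2::cs'') last = false := greedy_none _ _ _ (by
            simp [List.find?_eq_none, saysL, List.isPrefixOf, h2, Ne.symm h2])
          simp [hg]
    ·
      by_cases hcy : c = 'y'
      · subst hcy
        rcases cs' with _ | ⟨c2, cs''⟩
        · have hstep : stepA ([], mkUsed last, f) 'y' = (['y'], mkUsed last, f) := by
            simp [stepA, saysL]
          rw [List.foldl_cons, hstep, List.foldl_nil]
          have hg : greedy ['y'] last = false := greedy_none _ _ _ (by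
            simp [List.find?_eq_none, saysL, List.isPrefixOf])
          simp [hg]
        · by_cases h2 : c2 = 'e'
          · subst h2
            by_cases hb : last = some ['y','e']
            · subst hb
              rw [fold_banned_ye (mkUsed (some ['y','e'])) f cs'' (by decide)]
              have hg : greedy ('y'::'e'::cs'') (some ['y','e']) = false := greedy_none _ _ _ (by
                simp [List.find?_eq_none, saysL, List.isPrefixOf])
              simp [hg]
            · have hu : (mkUsed last)[1]?.getD false = true := by
                rcases hl with rfl | rfl | rfl | rfl | rfl <;>
                  first | exact absurd rfl hb | decide
              rw [fold_match_ye (mkUsed last) f cs'' hu]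
              have hlen' : cs''.length ≤ n := by simp at hlen; omega
              have hih := ih cs'' (f ++ ['y','e']) (some ['y','e']) hlen' (by simp [lastOpts])
              have hg : greedy ('y'::'e'::cs'') last = greedy cs'' (some ['y','e']) := by
                have hfind : saysL.find? (fun t => decide (some t ≠ last) && t.isPrefixOf ('y'::'e'::cs'')) = some ['y','e'] := by
                  simp [saysL, List.isPrefixOf, Ne.symm hb]
                simpa using greedy_some _ _ _ _ hfind
              rw [hg, show f ++ ('y'::'e'::cs'') = (f ++ ['y','e']) ++ cs'' by simp]
              exact hih
          · have hst : stepA ([], mkUsed last, f) 'y' = (['y'], mkUsed last, f) := by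
              simp [stepA, saysL]
            have h2s : stepA (['y'], mkUsed last, f) c2 = (['y',c2], mkUsed last, f) := by
              simp [stepA, saysL, h2]
            rw [List.foldl_cons, hst, List.foldl_cons, h2s,
                foldA_frozen cs'' ['y',c2] (mkUsed last) f (by simp)
                  (by simp [saysL, List.cons_prefix_cons, h2])]
            have hg : greedy ('y'::c2::cs'') last = false := greedy_none _ _ _ (by
              simp [List.find?_eq_none, saysL, List.isPrefixOf, h2, Ne.symm h2])
            simp [hg]
      ·
        by_cases hcw : c = 'w'
        · subst hcw
          rcases cs' with _ | ⟨c2, cs''⟩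
          · have hstep : stepA ([], mkUsed last, f) 'w' = (['w'], mkUsed last, f) := by
              simp [stepA, saysL]
            rw [List.foldl_cons, hstep, List.foldl_nil]
            have hg : greedy ['w'] last = false := greedy_none _ _ _ (by
              simp [List.find?_eq_none, saysL, List.isPrefixOf])
            simp [hg]
          · by_cases h2 : c2 = 'o'
            · subst h2
              rcases cs'' with _ | ⟨c3, cs3⟩
              · have hst : stepA ([], mkUsed last, f) 'w' = (['w'], mkUsed last, f) := by
                  simp [stepA, saysL]
                have h2s : stepA (['w'], mkUsed last, f) 'o' = (['w','o'], mkUsed last, f) := by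
                  simp [stepA, saysL]
                rw [List.foldl_cons, hst, List.foldl_cons, h2s, List.foldl_nil]
                have hg : greedy ['w','o'] last = false := greedy_none _ _ _ (by
                  simp [List.find?_eq_none, saysL, List.isPrefixOf])
                simp [hg]
              · by_cases h3 : c3 = 'o'
                · subst h3
                  by_cases hb : last = some ['w','o','o']
                  · subst hb
                    rw [fold_banned_woo (mkUsed (some ['w','o','o'])) f cs3 (by decide)]
                    have hg : greedy ('w'::'o'::'o'::cs3) (some ['w','o','o']) = false := greedy_none _ _ _ (by
                      simp [List.find?_eq_none, saysL, List.isPrefixOf])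
                    simp [hg]
                  · have hu : (mkUsed last)[2]?.getD false = true := by
                      rcases hl with rfl | rfl | rfl | rfl | rfl <;>
                        first | exact absurd rfl hb | decide
                    rw [fold_match_woo (mkUsed last) f cs3 hu]
                    have hlen' : cs3.length ≤ n := by simp at hlen; omega
                    have hih := ih cs3 (f ++ ['w','o','o']) (some ['w','o','o']) hlen' (by simp [lastOpts])
                    have hg : greedy ('w'::'o'::'o'::cs3) last = greedy cs3 (some ['w','o','o']) := by
                      have hfind : saysL.find? (fun t => decide (some t ≠ last) && t.isPrefixOf ('w'::'o'::'o'::cs3)) = some ['w','o','o'] := by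
                        simp [saysL, List.isPrefixOf, Ne.symm hb]
                      simpa using greedy_some _ _ _ _ hfind
                    rw [hg, show f ++ ('w'::'o'::'o'::cs3) = (f ++ ['w','o','o']) ++ cs3 by simp]
                    exact hih
                · have hst : stepA ([], mkUsed last, f) 'w' = (['w'], mkUsed last, f) := by
                    simp [stepA, saysL]
                  have h2s : stepA (['w'], mkUsed last, f) 'o' = (['w','o'], mkUsed last, f) := by
                    simp [stepA, saysL]
                  have h3s : stepA (['w','o'], mkUsed last, f) c3 = (['w','o',c3], mkUsed last, f) := by
                    simp [stepA, saysL, h3]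
                  rw [List.foldl_cons, hst, List.foldl_cons, h2s, List.foldl_cons, h3s,
                      foldA_frozen cs3 ['w','o',c3] (mkUsed last) f (by simp)
                        (by simp [saysL, List.cons_prefix_cons, h3])]
                  have hg : greedy ('w'::'o'::c3::cs3) last = false := greedy_none _ _ _ (by
                    simp [List.find?_eq_none, saysL, List.isPrefixOf, h3, Ne.symm h3])
                  simp [hg]
            · have hst : stepA ([], mkUsed last, f) 'w' = (['w'], mkUsed last, f) := by
                simp [stepA, saysL]
              have h2s : stepA (['w'], mkUsed last, f) c2 = (['w',c2], mkUsed last, f) := by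
                simp [stepA, saysL, h2]
              rw [List.foldl_cons, hst, List.foldl_cons, h2s,
                  foldA_frozen cs'' ['w',c2] (mkUsed last) f (by simp)
                    (by simp [saysL, List.cons_prefix_cons, h2])]
              have hg : greedy ('w'::c2::cs'') last = false := greedy_none _ _ _ (by
                simp [List.find?_eq_none, saysL, List.isPrefixOf, h2, Ne.symm h2])
              simp [hg]
        ·
          by_cases hcm : c = 'm'
          · subst hcm
            rcases cs' with _ | ⟨c2, cs''⟩
            · have hstep : stepA ([], mkUsed last, f) 'm' = (['m'], mkUsed last, f) := by
                simp [stepA, saysL]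
              rw [List.foldl_cons, hstep, List.foldl_nil]
              have hg : greedy ['m'] last = false := greedy_none _ _ _ (by
                simp [List.find?_eq_none, saysL, List.isPrefixOf])
              simp [hg]
            · by_cases h2 : c2 = 'a'
              · subst h2
                by_cases hb : last = some ['m','a']
                · subst hb
                  rw [fold_banned_ma (mkUsed (some ['m','a'])) f cs'' (by decide)]
                  have hg : greedy ('m'::'a'::cs'') (some ['m','a']) = false := greedy_none _ _ _ (by
                    simp [List.find?_eq_none, saysL, List.isPrefixOf])
                  simp [hg]
                · have hu : (mkUsed last)[3]?.getD false = true := by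
                    rcases hl with rfl | rfl | rfl | rfl | rfl <;>
                      first | exact absurd rfl hb | decide
                  rw [fold_match_ma (mkUsed last) f cs'' hu]
                  have hlen' : cs''.length ≤ n := by simp at hlen; omega
                  have hih := ih cs'' (f ++ ['m','a']) (some ['m','a']) hlen' (by simp [lastOpts])
                  have hg : greedy ('m'::'a'::cs'') last = greedy cs'' (some ['m','a']) := by
                    have hfind : saysL.find? (fun t => decide (some t ≠ last) && t.isPrefixOf ('m'::'a'::cs'')) = some ['m','a'] := by
                      simp [saysL, List.isPrefixOf, Ne.symm hb]
                    simpa using greedy_some _ _ _ _ hfind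
                  rw [hg, show f ++ ('m'::'a'::cs'') = (f ++ ['m','a']) ++ cs'' by simp]
                  exact hih
              · have hst : stepA ([], mkUsed last, f) 'm' = (['m'], mkUsed last, f) := by
                  simp [stepA, saysL]
                have h2s : stepA (['m'], mkUsed last, f) c2 = (['m',c2], mkUsed last, f) := by
                  simp [stepA, saysL, h2]
                rw [List.foldl_cons, hst, List.foldl_cons, h2s,
                    foldA_frozen cs'' ['m',c2] (mkUsed last) f (by simp)
                      (by simp [saysL, List.cons_prefix_cons, h2])]
                have hg : greedy ('m'::c2::cs'') last = false := greedy_none _ _ _ (by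
                  simp [List.find?_eq_none, saysL, List.isPrefixOf, h2, Ne.symm h2])
                simp [hg]
          ·
            have hstep : stepA ([], mkUsed last, f) c = ([c], mkUsed last, f) := by
              simp [stepA, saysL, hca, hcy, hcw, hcm]
            rw [List.foldl_cons, hstep,
                foldA_frozen cs' [c] (mkUsed last) f (by simp)
                  (by simp [saysL, List.cons_prefix_cons, hca, hcy, hcw, hcm])]
            have hg : greedy (c::cs') last = false := greedy_none _ _ _ (by
              simp [List.find?_eq_none, saysL, List.isPrefixOf, hca, hcy, hcw, hcm, Ne.symm hca, Ne.symm hcy, Ne.symm hcw, Ne.symm hcm])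
            simp [hg]

-- ===== VERDICT (by name: the statement is the Claim_ definition above) =====
theorem solution_spec : Claim_equal_solution := by
  intro babbling hd
  unfold Spec_solution solution solution_alt
  induction babbling using List.reverseRecOn with
  | nil => rfl
  | append_singleton xs x ih =>
    have hdx : Dom_solution xs := by
      unfold Dom_solution at hd ⊢; simp only [List.all_append, Bool.and_eq_true] at hd; exact hd.1
    rw [List.foldl_append, List.foldl_append, ← ih hdx]
    have h := main_lemma x.toList.length x.toList [] none le_rfl (by simp [lastOpts])
    simp only [List.nil_append, mkUsed] at h
    simp only [List.foldl_cons, List.foldl_nil]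
    by_cases hg : greedy x.toList none = true
    · rw [if_pos (h.mpr hg).symm, if_pos hg]
    · rw [if_neg (fun he => hg (h.mp he.symm)), if_neg hg]
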